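-- pv_equiv track=rewrite | github.com/Sendersby/tioli-ai-exchange | app/agents_alive/visitor_analytics.py | determine_journey_stage
-- ===== SOURCE A (Python) =====
-- def determine_journey_stage(categories: list) -> str:
--     """Determine how deep an agent got in the journey."""
--     stages = {
--         "registration": 1, "onboarding": 2, "wallet": 3,
--         "discovery": 4, "community": 5, "marketplace": 6,
--         "trading": 7, "memory": 8, "policy": 9,
--     }
--     max_stage = 0
--     stage_name = "unknown"
--     for cat in categories:
--         if cat in stages and stages[cat] > max_stage:
--             max_stage = stages[cat]
--             stage_name = cat
--     return stage_name
-- ===== SOURCE B (Python) =====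
-- def determine_journey_stage(categories: list) -> str:
--     """Determine how deep an agent got in the journey."""
--     cat_set = set(categories)
--     for name in ("policy", "memory", "trading", "marketplace",
--                  "community", "discovery", "wallet", "onboarding",
--                  "registration"):
--         if name in cat_set:
--             return name
--     return "unknown"
-- ===== Notes on version B (the rewrite author's own statement) =====
-- stated objective: idiomatic
-- what changed: B builds a set of the categories once and walks the fixed stage names in descending rank, returning the first one present, instead of scanning the input while tracking a running maximum rank and name.
import Mathlib
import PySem

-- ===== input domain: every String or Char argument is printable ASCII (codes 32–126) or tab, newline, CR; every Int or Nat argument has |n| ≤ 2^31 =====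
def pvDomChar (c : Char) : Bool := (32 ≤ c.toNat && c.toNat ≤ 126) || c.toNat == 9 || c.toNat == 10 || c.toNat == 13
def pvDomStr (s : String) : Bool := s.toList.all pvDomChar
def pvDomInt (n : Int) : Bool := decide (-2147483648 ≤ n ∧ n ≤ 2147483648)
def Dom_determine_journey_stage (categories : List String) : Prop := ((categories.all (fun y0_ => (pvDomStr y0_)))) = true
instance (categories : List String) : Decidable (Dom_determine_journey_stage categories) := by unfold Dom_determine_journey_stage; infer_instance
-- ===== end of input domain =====

-- B rewrites A more idiomatically: build a set of the categories once and return the first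
-- stage name, in descending rank order, that is present; return value only, no side effects.

-- ===== PORT A =====
def pyStages : PySem.Dict String Int :=
  PySem.Dict.ofList [("registration", 1), ("onboarding", 2), ("wallet", 3),
    ("discovery", 4), ("community", 5), ("marketplace", 6),
    ("trading", 7), ("memory", 8), ("policy", 9)]

def determine_journey_stage (categories : List String) : String :=
  let r := categories.foldl (fun (st : Int × String) cat =>
    match PySem.Dict.get? pyStages cat with      -- 'cat in stages' then 'stages[cat]'
    | some v => if v > st.1 then (v, cat) else st
    | none => st) (0, "unknown")
  r.2

-- ===== PORT B =====
def stageOrder : List String :=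
  ["policy", "memory", "trading", "marketplace", "community",
   "discovery", "wallet", "onboarding", "registration"]

def determine_journey_stage_alt (categories : List String) : String :=
  let catSet : PySem.Set String := PySem.Set.ofList categories
  -- 'for name in …: if name in cat_set: return name' with final 'return "unknown"'
  (stageOrder.find? (fun name => PySem.Set.contains catSet name)).getD "unknown"

-- ===== PRECONDITION & SPEC =====
def Spec_determine_journey_stage (categories : List String) (out : String) : Prop := out = determine_journey_stage_alt categories
instance (categories : List String) (out : String) : Decidable (Spec_determine_journey_stage categories out) := by unfold Spec_determine_journey_stage; infer_instance

-- ===== CLAIM (what is proved, stated in full; the proofs are below) =====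
def Claim_equal_determine_journey_stage : Prop := ∀ (categories : List String), Dom_determine_journey_stage categories → Spec_determine_journey_stage categories (determine_journey_stage categories)

-- ===== LEMMAS AND PROOFS =====

/-- The rank a Python-side stage lookup assigns to a string (0 = not a stage). -/
def rk (s : String) : Int :=
  if s = "registration" then 1 else if s = "onboarding" then 2 else
  if s = "wallet" then 3 else if s = "discovery" then 4 else
  if s = "community" then 5 else if s = "marketplace" then 6 else
  if s = "trading" then 7 else if s = "memory" then 8 else
  if s = "policy" then 9 else 0

/-- The stage name of a rank (0 ↦ "unknown"). -/
def nm (k : Int) : String :=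
  if k = 1 then "registration" else if k = 2 then "onboarding" else
  if k = 3 then "wallet" else if k = 4 then "discovery" else
  if k = 5 then "community" else if k = 6 then "marketplace" else
  if k = 7 then "trading" else if k = 8 then "memory" else
  if k = 9 then "policy" else "unknown"

/-- Maximum rank occurring in the list. -/
def mr (cs : List String) : Int := cs.foldr (fun c a => max (rk c) a) 0

lemma get?_pyStages (c : String) :
    PySem.Dict.get? pyStages c = if rk c = 0 then none else some (rk c) := by
  have hmk : pyStages = PySem.Dict.mk [("registration", 1), ("onboarding", 2), ("wallet", 3),
      ("discovery", 4), ("community", 5), ("marketplace", 6),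
      ("trading", 7), ("memory", 8), ("policy", 9)] := by decide
  rw [hmk]
  by_cases h1 : c = "registration"
  · subst h1; decide
  by_cases h2 : c = "onboarding"
  · subst h2; decide
  by_cases h3 : c = "wallet"
  · subst h3; decide
  by_cases h4 : c = "discovery"
  · subst h4; decide
  by_cases h5 : c = "community"
  · subst h5; decide
  by_cases h6 : c = "marketplace"
  · subst h6; decide
  by_cases h7 : c = "trading"
  · subst h7; decide
  by_cases h8 : c = "memory"
  · subst h8; decide
  by_cases h9 : c = "policy"
  · subst h9; decide
  have hrk : rk c = 0 := by unfold rk; split_ifs; all_goals simp_all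
  rw [hrk, if_pos rfl]
  simp [beq_iff_eq, Ne.symm h1, Ne.symm h2, Ne.symm h3, Ne.symm h4, Ne.symm h5, Ne.symm h6, Ne.symm h7, Ne.symm h8, Ne.symm h9, PySem.Dict.get?]

lemma rk_cases (c : String) :
    rk c = 0 ∨ (1 ≤ rk c ∧ rk c ≤ 9 ∧ nm (rk c) = c) := by
  unfold rk
  split_ifs <;>
    first
      | (left; rfl)
      | (right; subst_vars; exact ⟨by norm_num, by norm_num, by decide⟩)

lemma mr_nonneg (cs : List String) : 0 ≤ mr cs := by
  induction cs with
  | nil => simp [mr]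
  | cons c cs ih => simp only [mr, List.foldr] at *; omega

lemma mr_cons (c : String) (cs : List String) : mr (c :: cs) = max (rk c) (mr cs) := rfl

lemma mr_ge {c : String} {cs : List String} (h : c ∈ cs) : rk c ≤ mr cs := by
  induction cs with
  | nil => simp at h
  | cons d cs ih =>
    rw [mr_cons]
    rcases List.mem_cons.mp h with rfl | h
    · omega
    · have := ih h; omega

lemma mr_le {cs : List String} {k : Int} (h : ∀ c ∈ cs, rk c ≤ k) (hk : 0 ≤ k) :
    mr cs ≤ k := by
  induction cs with
  | nil => simpa [mr]
  | cons c cs ih =>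
    rw [mr_cons]
    have h1 := h c (by simp)
    have h2 := ih (fun c hc => h c (List.mem_cons_of_mem _ hc))
    omega

/-- A's loop, characterised: it returns the maximal rank and its stage name. -/
lemma loopA_spec (cs : List String) : ∀ (m : Int) (n : String), 0 ≤ m →
    cs.foldl (fun (st : Int × String) cat =>
      match PySem.Dict.get? pyStages cat with
      | some v => if v > st.1 then (v, cat) else st
      | none => st) (m, n)
    = if mr cs > m then (mr cs, nm (mr cs)) else (m, n) := by
  induction cs with
  | nil =>
    intro m n hm
    simp [mr, show ¬ ((0:Int) > m) by omega]
  | cons c cs ih =>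
    intro m n hm
    rw [List.foldl_cons, get?_pyStages, mr_cons]
    rcases rk_cases c with h0 | ⟨h1, h9, hnm⟩
    · rw [h0]
      simp only [reduceIte]
      rw [ih m n hm]
      have := mr_nonneg cs
      by_cases hle : mr cs ≤ m
      · rw [if_neg (by omega), if_neg (by omega)]
      · rw [if_pos (by omega), if_pos (by omega), max_eq_right (by omega)]
    · rw [if_neg (by omega)]
      simp only
      by_cases hc : rk c > m
      · rw [if_pos hc, ih _ _ (by omega)]
        by_cases hle : mr cs ≤ rk c
        · rw [if_neg (by omega), if_pos (by omega), max_eq_left hle, hnm]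
        · rw [if_pos (by omega), if_pos (by omega), max_eq_right (by omega)]
      · rw [if_neg hc, ih m n hm]
        by_cases hlt : m < mr cs
        · rw [if_pos hlt, if_pos (by omega), max_eq_right (by omega)]
        · rw [if_neg (by omega), if_neg (by omega)]

lemma A_eq_nm_mr (cs : List String) : determine_journey_stage cs = nm (mr cs) := by
  unfold determine_journey_stage
  rw [loopA_spec cs 0 "unknown" le_rfl]
  have := mr_nonneg cs
  by_cases h : (0:Int) < mr cs
  · rw [if_pos h]
  · rw [if_neg (by omega)]
    have hz : mr cs = 0 := by omega
    rw [hz]; rfl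

/-- if rk c is at least k (1 ≤ k ≤ 9), c is one of the stages of rank ≥ k. -/
lemma rk_le_of_not_mem {cs : List String} {k : Int}
    (h : ∀ c ∈ cs, rk c ≠ k) (hmr : mr cs ≤ k) (hk : 1 ≤ k) : mr cs ≤ k - 1 := by
  have : ∀ c ∈ cs, rk c ≤ k - 1 := by
    intro c hc
    have := mr_ge hc
    have := h c hc
    omega
  exact mr_le this (by omega)

lemma rk_eq_iff (c : String) (k : Int) (h1 : 1 ≤ k) (h9 : k ≤ 9) :
    rk c = k ↔ c = nm k := by
  constructor
  · intro h
    rcases rk_cases c with h0 | ⟨_, _, hnm⟩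
    · omega
    · rw [← h, hnm]
  · intro h
    subst h
    unfold nm
    split_ifs <;> first | (subst_vars; decide) | omega

lemma mr_le_nine (cs : List String) : mr cs ≤ 9 := by
  refine mr_le (fun c _ => ?_) (by norm_num)
  rcases rk_cases c with h | ⟨_, h, _⟩ <;> omega

lemma mr_eq_of_mem {cs : List String} {k : Int} (h1 : 1 ≤ k) (h9 : k ≤ 9)
    (hub : mr cs ≤ k) (hm : nm k ∈ cs) : mr cs = k := by
  have := mr_ge hm
  rw [(rk_eq_iff (nm k) k h1 h9).mpr rfl] at this
  omega

lemma mr_dec_of_not_mem {cs : List String} {k : Int} (h1 : 1 ≤ k) (h9 : k ≤ 9)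
    (hub : mr cs ≤ k) (hm : nm k ∉ cs) : mr cs ≤ k - 1 := by
  refine rk_le_of_not_mem (fun c hc hek => ?_) hub h1
  exact hm ((rk_eq_iff c k h1 h9).mp hek ▸ hc)

lemma B_eq_nm_mr (cs : List String) : determine_journey_stage_alt cs = nm (mr cs) := by
  simp only [determine_journey_stage_alt, stageOrder]
  have h9 := mr_le_nine cs
  by_cases m9 : "policy" ∈ cs
  · rw [List.find?_cons_of_pos (by simp [m9])]
    rw [mr_eq_of_mem (cs := cs) (k := 9) (by norm_num) (by norm_num) h9 (by rw [show nm 9 = "policy" from by decide]; exact m9)]; decide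
  rw [List.find?_cons_of_neg (by simp [m9])]
  have h8 := mr_dec_of_not_mem (cs := cs) (k := 9) (by norm_num) (by norm_num) h9 (by rw [show nm 9 = "policy" from by decide]; exact m9)
  by_cases m8 : "memory" ∈ cs
  · rw [List.find?_cons_of_pos (by simp [m8])]
    rw [mr_eq_of_mem (cs := cs) (k := 8) (by norm_num) (by norm_num) (by omega) (by rw [show nm 8 = "memory" from by decide]; exact m8)]; decide
  rw [List.find?_cons_of_neg (by simp [m8])]
  have h7 := mr_dec_of_not_mem (cs := cs) (k := 8) (by norm_num) (by norm_num) (by omega) (by rw [show nm 8 = "memory" from by decide]; exact m8)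
  by_cases m7 : "trading" ∈ cs
  · rw [List.find?_cons_of_pos (by simp [m7])]
    rw [mr_eq_of_mem (cs := cs) (k := 7) (by norm_num) (by norm_num) (by omega) (by rw [show nm 7 = "trading" from by decide]; exact m7)]; decide
  rw [List.find?_cons_of_neg (by simp [m7])]
  have h6 := mr_dec_of_not_mem (cs := cs) (k := 7) (by norm_num) (by norm_num) (by omega) (by rw [show nm 7 = "trading" from by decide]; exact m7)
  by_cases m6 : "marketplace" ∈ cs
  · rw [List.find?_cons_of_pos (by simp [m6])]
    rw [mr_eq_of_mem (cs := cs) (k := 6) (by norm_num) (by norm_num) (by omega) (by rw [show nm 6 = "marketplace" from by decide]; exact m6)]; decide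
  rw [List.find?_cons_of_neg (by simp [m6])]
  have h5 := mr_dec_of_not_mem (cs := cs) (k := 6) (by norm_num) (by norm_num) (by omega) (by rw [show nm 6 = "marketplace" from by decide]; exact m6)
  by_cases m5 : "community" ∈ cs
  · rw [List.find?_cons_of_pos (by simp [m5])]
    rw [mr_eq_of_mem (cs := cs) (k := 5) (by norm_num) (by norm_num) (by omega) (by rw [show nm 5 = "community" from by decide]; exact m5)]; decide
  rw [List.find?_cons_of_neg (by simp [m5])]
  have h4 := mr_dec_of_not_mem (cs := cs) (k := 5) (by norm_num) (by norm_num) (by omega) (by rw [show nm 5 = "community" from by decide]; exact m5)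
  by_cases m4 : "discovery" ∈ cs
  · rw [List.find?_cons_of_pos (by simp [m4])]
    rw [mr_eq_of_mem (cs := cs) (k := 4) (by norm_num) (by norm_num) (by omega) (by rw [show nm 4 = "discovery" from by decide]; exact m4)]; decide
  rw [List.find?_cons_of_neg (by simp [m4])]
  have h3 := mr_dec_of_not_mem (cs := cs) (k := 4) (by norm_num) (by norm_num) (by omega) (by rw [show nm 4 = "discovery" from by decide]; exact m4)
  by_cases m3 : "wallet" ∈ cs
  · rw [List.find?_cons_of_pos (by simp [m3])]
    rw [mr_eq_of_mem (cs := cs) (k := 3) (by norm_num) (by norm_num) (by omega) (by rw [show nm 3 = "wallet" from by decide]; exact m3)]; decide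
  rw [List.find?_cons_of_neg (by simp [m3])]
  have h2 := mr_dec_of_not_mem (cs := cs) (k := 3) (by norm_num) (by norm_num) (by omega) (by rw [show nm 3 = "wallet" from by decide]; exact m3)
  by_cases m2 : "onboarding" ∈ cs
  · rw [List.find?_cons_of_pos (by simp [m2])]
    rw [mr_eq_of_mem (cs := cs) (k := 2) (by norm_num) (by norm_num) (by omega) (by rw [show nm 2 = "onboarding" from by decide]; exact m2)]; decide
  rw [List.find?_cons_of_neg (by simp [m2])]
  have h1 := mr_dec_of_not_mem (cs := cs) (k := 2) (by norm_num) (by norm_num) (by omega) (by rw [show nm 2 = "onboarding" from by decide]; exact m2)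
  by_cases m1 : "registration" ∈ cs
  · rw [List.find?_cons_of_pos (by simp [m1])]
    rw [mr_eq_of_mem (cs := cs) (k := 1) (by norm_num) (by norm_num) (by omega) (by rw [show nm 1 = "registration" from by decide]; exact m1)]; decide
  rw [List.find?_cons_of_neg (by simp [m1])]
  have h0 := mr_dec_of_not_mem (cs := cs) (k := 1) (by norm_num) (by norm_num) (by omega) (by rw [show nm 1 = "registration" from by decide]; exact m1)
  have hz : mr cs = 0 := by have := mr_nonneg cs; omega
  rw [hz]; rfl

-- ===== VERDICT (by name: the statement is the Claim_ definition above) =====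
theorem determine_journey_stage_spec : Claim_equal_determine_journey_stage := by
  intro cs _
  unfold Spec_determine_journey_stage
  rw [A_eq_nm_mr, B_eq_nm_mr]
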